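-- pv_equiv track=rewrite | github.com/idontwantcookies/ubiquitous-octo-funicular | modular_arithmetic.py | subgroup
-- ===== SOURCE A (Python) =====
-- def subgroup(b:int, n:int, phi:int) -> list[int]:
--     '''Gera o subgrupo de potências de b mod n, até phi, onde phi é o totiente de n.
--     Retorna uma lista de tamanho phi.'''
--     powers = []
--     pi = 1
--     for _ in range(phi):
--         pi = pi * b % n
--         powers.append(pi)
--         if pi == 1: break
--     return powers
-- ===== SOURCE B (Python) =====
-- def subgroup(b: int, n: int, phi: int) -> list[int]:
--     '''Two staged passes: first find the list length (the least exponent i in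
--     1..phi with b**i % n == 1, or phi if none), then build the whole answer
--     as one comprehension of independent modular exponentiations.'''
--     length = next((i for i in range(1, phi + 1) if pow(b, i, n) == 1), phi)
--     return [pow(b, i, n) for i in range(1, length + 1)]
-- ===== Notes on version B (the rewrite author's own statement) =====
-- stated objective: alternative
-- what changed: Replaces the single stateful loop (running product pi = pi*b % n with an early break) by two stateless stages: a search for the output length (first exponent whose power mod n is 1, else phi) followed by a comprehension that maps independent pow(b, i, n) calls over that range.
import Mathlib
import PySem

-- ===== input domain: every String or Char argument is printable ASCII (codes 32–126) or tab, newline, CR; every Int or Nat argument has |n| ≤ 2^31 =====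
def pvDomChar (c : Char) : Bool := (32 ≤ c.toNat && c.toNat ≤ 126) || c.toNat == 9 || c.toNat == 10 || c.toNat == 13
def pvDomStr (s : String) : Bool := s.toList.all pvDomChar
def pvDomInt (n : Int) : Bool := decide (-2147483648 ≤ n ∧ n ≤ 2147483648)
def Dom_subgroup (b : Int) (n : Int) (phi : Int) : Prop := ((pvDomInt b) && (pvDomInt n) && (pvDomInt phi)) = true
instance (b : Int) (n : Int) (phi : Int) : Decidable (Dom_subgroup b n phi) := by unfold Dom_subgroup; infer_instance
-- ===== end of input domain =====

-- B replaces A's stateful running-product loop by two stateless stages: find the output length, then map pow over the range (objective: alternative).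

-- ===== PORT A =====
-- the for-loop over range(phi) with early break, carrying the running product pi
def subgroupGo (b : Int) (n : Int) : Nat → Int → List Int
  | 0, _ => []
  | k + 1, pi =>
    let pi' := PySem.Int.mod (pi * b) n
    if pi' = 1 then [pi'] else pi' :: subgroupGo b n k pi'

def subgroup (b : Int) (n : Int) (phi : Int) : List Int :=
  subgroupGo b n phi.toNat 1

-- ===== PORT B =====
-- stage 1: length = next((i for i in range(1, phi+1) if pow(b,i,n) == 1), phi)
-- stage 2: [pow(b, i, n) for i in range(1, length+1)]
def subgroup_alt (b : Int) (n : Int) (phi : Int) : List Int :=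
  let length :=
    ((PySem.List.pyRange 1 (phi + 1) 1).find?
      (fun i => PySem.Int.powMod b i.toNat n == 1)).getD phi
  (PySem.List.pyRange 1 (length + 1) 1).map (fun i => PySem.Int.powMod b i.toNat n)

-- ===== PRECONDITION & SPEC =====
-- Pre_ excludes only n = 0 with phi ≥ 1, where Python A raises ZeroDivisionError (and B raises ValueError).
def Pre_subgroup (b : Int) (n : Int) (phi : Int) : Prop := phi ≤ 0 ∨ n ≠ 0
instance (b : Int) (n : Int) (phi : Int) : Decidable (Pre_subgroup b n phi) := by unfold Pre_subgroup; infer_instance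
def pvWitness_subgroup : Int × Int × Int := (3, 7, 6)

def Spec_subgroup (b : Int) (n : Int) (phi : Int) (out : List Int) : Prop := out = subgroup_alt b n phi
instance (b : Int) (n : Int) (phi : Int) (out : List Int) : Decidable (Spec_subgroup b n phi out) := by unfold Spec_subgroup; infer_instance

-- ===== CLAIM (what is proved, stated in full; the proofs are below) =====
def Claim_equal_subgroup : Prop := ∀ (b : Int) (n : Int) (phi : Int), Dom_subgroup b n phi → Pre_subgroup b n phi → Spec_subgroup b n phi (subgroup b n phi)

-- ===== LEMMAS AND PROOFS =====

-- proof-only intermediate: A's loop rewritten to compute each element as b^i mod n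
def midGo (b : Int) (n : Int) : Nat → Int → List Int
  | 0, _ => []
  | k + 1, i =>
    let p := PySem.Int.powMod b i.toNat n
    if p = 1 then [p] else p :: midGo b n k (i + 1)

theorem fmod_mul_fmod (x b n : Int) : ((x.fmod n) * b).fmod n = (x * b).fmod n := by
  conv_rhs => rw [← Int.fmod_add_mul_fdiv x n]
  rw [add_mul, show n * x.fdiv n * b = n * (x.fdiv n * b) by ring, Int.add_mul_fmod_self_left]

-- loop invariant: when pi ≡ b^i (mod n), A's remaining loop equals the per-index form from i+1 on
theorem go_eq_mid (b n : Int) : ∀ (k i : Nat) (pi : Int),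
    pi.fmod n = (b ^ i).fmod n →
    subgroupGo b n k pi = midGo b n k ((i : Int) + 1) := by
  intro k
  induction k with
  | zero => intro i pi _; rfl
  | succ k ih =>
    intro i pi h
    have hstep : PySem.Int.mod (pi * b) n = PySem.Int.powMod b ((i : Int) + 1).toNat n := by
      have : ((i : Int) + 1).toNat = i + 1 := by omega
      simp only [PySem.Int.powMod, PySem.Int.mod, this, pow_succ]
      rw [← fmod_mul_fmod (b ^ i) b n, ← h, fmod_mul_fmod]
    simp only [subgroupGo, midGo, ← hstep]
    split
    · rfl
    · rw [ih (i + 1) _ (by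
        simp only [PySem.Int.mod, Int.fmod_fmod]
        rw [pow_succ, ← fmod_mul_fmod (b ^ i) b n, ← h, fmod_mul_fmod]),
        show ((i : Int) + 1) + 1 = ((i + 1 : Nat) : Int) + 1 by push_cast; ring]

-- the per-index loop equals find?-then-map over the corresponding range
theorem mid_eq_find_map (b n : Int) : ∀ (k : Nat) (i : Int),
    midGo b n k i =
      (PySem.List.pyRange i (((PySem.List.pyRange i (i + k) 1).find?
          (fun j => PySem.Int.powMod b j.toNat n == 1)).getD (i + k - 1) + 1) 1).map
        (fun j => PySem.Int.powMod b j.toNat n) := by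
  intro k
  induction k with
  | zero =>
    intro i
    rw [PySem.List.pyRange_one_eq_nil (by omega : i + ((0:Nat):Int) ≤ i)]
    simp only [List.find?_nil, Option.getD_none]
    rw [PySem.List.pyRange_one_eq_nil (by push_cast; omega : (i + ((0:Nat):Int) - 1) + 1 ≤ i)]
    rfl
  | succ k ih =>
    intro i
    push_cast
    have hlt : i < i + ((k : Int) + 1) := by omega
    rw [PySem.List.pyRange_one_cons hlt]
    simp only [List.find?_cons]
    by_cases hp : PySem.Int.powMod b i.toNat n = 1
    · have hb : (PySem.Int.powMod b i.toNat n == 1) = true := by simp [hp]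
      simp only [midGo, if_pos hp, hb, Option.getD_some]
      rw [PySem.List.pyRange_one_cons (by omega : i < i + 1),
          PySem.List.pyRange_one_eq_nil (by omega : i + 1 ≤ i + 1)]
      simp
    · have hb : (PySem.Int.powMod b i.toNat n == 1) = false := by simp [hp]
      simp only [midGo, if_neg hp, hb]
      rw [ih (i + 1)]
      rw [show (i + 1 + (k:Int) : Int) = i + ((k:Int) + 1) by ring]
      cases hf : (PySem.List.pyRange (i+1) (i + ((k:Int)+1)) 1).find?
          (fun j => PySem.Int.powMod b j.toNat n == 1) with
      | none =>
        simp only [Option.getD_none]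
        rw [show (i + ((k:Int)+1) - 1 + 1 : Int) = i + ((k:Int)+1) by ring]
        rw [PySem.List.pyRange_one_cons hlt]
        simp
      | some j =>
        have hj : j ∈ PySem.List.pyRange (i+1) (i + ((k:Int)+1)) 1 := List.mem_of_find?_eq_some hf
        have hji : i + 1 ≤ j := ((PySem.List.mem_pyRange_one).1 hj).1
        simp only [Option.getD_some]
        rw [PySem.List.pyRange_one_cons (by omega : i < j + 1)]
        simp

-- ===== VERDICT (by name: the statement is the Claim_ definition above) =====
theorem subgroup_spec : Claim_equal_subgroup := by
  intro b n phi _ _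
  unfold Spec_subgroup subgroup subgroup_alt
  by_cases hphi : phi ≤ 0
  · have h0 : phi.toNat = 0 := by omega
    have hnil : PySem.List.pyRange 1 (phi + 1) 1 = [] :=
      PySem.List.pyRange_one_eq_nil (by omega)
    simp [h0, subgroupGo, hnil]
  · have h1 : (1 : Int) + (phi.toNat : Int) = phi + 1 := by omega
    rw [go_eq_mid b n phi.toNat 0 1 (by simp), show ((0:Nat) : Int) + 1 = 1 by norm_num,
        mid_eq_find_map b n phi.toNat 1, h1,
        show (phi + 1 - 1 : Int) = phi by ring]
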